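-- pv_equiv track=rewrite | github.com/deliangyang/agent-todo-impl | src/agent_todo_impl/execution/cursor_agent.py | _cursor_agent_command_for_log
-- ===== SOURCE A (Python) =====
-- import shlex
--
-- def cursor_agent_command_string(cmd: list[str]) -> str:
--     return " ".join(shlex.quote(x) for x in cmd)
--
-- def _cursor_agent_command_for_log(cmd: list[str]) -> str:
--     parts: list[str] = []
--     i = 0
--     while i < len(cmd):
--         if cmd[i] == "--api-key" and i + 1 < len(cmd):
--             parts.extend(["--api-key", "***REDACTED***"])
--             i += 2
--         elif cmd[i] == "--resume" and i + 1 < len(cmd):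
--             parts.extend(["--resume", "***SESSION***"])
--             i += 2
--         else:
--             parts.append(cmd[i])
--             i += 1
--     return cursor_agent_command_string(parts)
-- ===== SOURCE B (Python) =====
-- import re
--
-- # shell-quote one token: safe tokens pass through, anything else is single-quoted
-- # (embedded single quotes become '"'"').  This is the POSIX shell quoting rule.
-- _UNSAFE = re.compile(r"[^\w@%+=:,./-]", re.ASCII)
--
-- _PLACEHOLDER = {"--api-key": "***REDACTED***", "--resume": "***SESSION***"}
--
--
-- def _shell_quote(s: str) -> str:
--     if s and not _UNSAFE.search(s):
--         return s
--     return "'" + s.replace("'", "'\"'\"'") + "'"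
--
--
-- def _cursor_agent_command_for_log(cmd: list[str]) -> str:
--     out: list[str] = []
--     prev = None
--     for tok in cmd:
--         emitted = _PLACEHOLDER.get(prev, tok)
--         out.append(emitted)
--         prev = emitted
--     return " ".join(_shell_quote(x) for x in out)
-- ===== Notes on version B (the rewrite author's own statement) =====
-- stated objective: alternative
-- what changed: B is a single fold carrying the previously emitted token: each output token is _PLACEHOLDER.get(prev, tok), so redaction is a table lookup keyed on the previous emitted token instead of A's consume-two-tokens-and-skip index loop; token quoting applies the same POSIX shell rule (safe set via a regex, as shlex does internally) since shlex itself is outside B's allowed imports.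
import Mathlib
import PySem

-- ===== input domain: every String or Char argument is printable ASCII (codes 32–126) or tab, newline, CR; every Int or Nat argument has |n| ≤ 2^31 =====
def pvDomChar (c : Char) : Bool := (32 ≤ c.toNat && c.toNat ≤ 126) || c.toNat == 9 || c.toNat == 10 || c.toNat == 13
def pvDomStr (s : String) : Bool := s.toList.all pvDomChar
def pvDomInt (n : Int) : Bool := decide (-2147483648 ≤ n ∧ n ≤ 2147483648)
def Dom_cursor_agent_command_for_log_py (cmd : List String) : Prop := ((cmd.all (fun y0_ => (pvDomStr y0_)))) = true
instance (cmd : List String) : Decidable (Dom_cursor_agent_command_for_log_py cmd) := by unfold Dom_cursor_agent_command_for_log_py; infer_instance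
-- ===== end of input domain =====

-- B replaces A's consume-two-and-build-new-list loop with a single fold that remembers the
-- previously emitted token and looks it up in a placeholder table; equivalence of return values.

-- The safe character set of POSIX shell quoting (= shlex.quote's, exact on printable ASCII):
-- [A-Za-z0-9_@%+=:,./-]
def pvSafeChar (c : Char) : Bool :=
  c.isAlphanum || c ∈ ['_', '@', '%', '+', '=', ':', ',', '.', '/', '-']

def pvShlexQuote (s : String) : String :=
  if s.toList = [] then "''"
  else if s.toList.all pvSafeChar then s
  else "'" ++ PySem.Str.replace s "'" "'\"'\"'" ++ "'"

-- " ".join(shlex.quote(x) for x in parts)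
def pvCommandString (parts : List String) : String :=
  PySem.Str.join " " (parts.map pvShlexQuote)

-- ===== PORT A =====
-- A's while loop: on a flag with a following token, emit flag + placeholder and skip two; else emit and step one.
def pvRedactA : List String → List String
  | [] => []
  | x :: rest =>
    if x = "--api-key" ∧ rest ≠ [] then
      "--api-key" :: "***REDACTED***" :: pvRedactA rest.tail
    else if x = "--resume" ∧ rest ≠ [] then
      "--resume" :: "***SESSION***" :: pvRedactA rest.tail
    else
      x :: pvRedactA rest
termination_by xs => xs.length
decreasing_by all_goals (cases rest <;> simp_all)

def cursor_agent_command_for_log_py (cmd : List String) : String :=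
  pvCommandString (pvRedactA cmd)

-- ===== PORT B =====
-- B's table: _PLACEHOLDER
def pvPlaceholder : PySem.Dict String String :=
  PySem.Dict.ofList [("--api-key", "***REDACTED***"), ("--resume", "***SESSION***")]

-- B's for loop as a fold over (out, prev): emitted = _PLACEHOLDER.get(prev, tok); append; prev = emitted.
def pvStepB (acc : List String × Option String) (tok : String) : List String × Option String :=
  let emitted := match acc.2 with
    | none => tok
    | some p => PySem.Dict.getD pvPlaceholder p tok
  (acc.1 ++ [emitted], some emitted)

-- B's _shell_quote: safe nonempty tokens pass through, else single-quote.
def pvQuoteB (s : String) : String :=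
  if s.toList ≠ [] ∧ s.toList.all pvSafeChar then s
  else "'" ++ PySem.Str.replace s "'" "'\"'\"'" ++ "'"

def cursor_agent_command_for_log_py_alt (cmd : List String) : String :=
  PySem.Str.join " " (((cmd.foldl pvStepB ([], none)).1).map pvQuoteB)

-- ===== PRECONDITION & SPEC =====
def Spec_cursor_agent_command_for_log_py (cmd : List String) (out : String) : Prop := out = cursor_agent_command_for_log_py_alt cmd
instance (cmd : List String) (out : String) : Decidable (Spec_cursor_agent_command_for_log_py cmd out) := by unfold Spec_cursor_agent_command_for_log_py; infer_instance

-- ===== CLAIM (what is proved, stated in full; the proofs are below) =====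
def Claim_equal_cursor_agent_command_for_log_py : Prop := ∀ (cmd : List String), Dom_cursor_agent_command_for_log_py cmd → Spec_cursor_agent_command_for_log_py cmd (cursor_agent_command_for_log_py cmd)

-- ===== LEMMAS AND PROOFS =====

-- B's quoting agrees with A's shlex.quote token for token.
theorem pvQuoteB_eq (s : String) : pvQuoteB s = pvShlexQuote s := by
  by_cases h : s.toList = []
  · have hs : s = "" := by
      have := String.toList_inj (s₁ := s) (s₂ := "")
      simp_all
    subst hs; decide
  · simp [pvQuoteB, pvShlexQuote, h]

-- The emitted token of one step of B: _PLACEHOLDER.get(prev, tok) (prev = None looks nothing up).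
def pvEmit (prev : Option String) (t : String) : String :=
  match prev with
  | none => t
  | some p => PySem.Dict.getD pvPlaceholder p t

-- B's fold, written as a recursion on the remaining input with the prev state explicit.
def pvRunB (prev : Option String) : List String → List String
  | [] => []
  | t :: ts => pvEmit prev t :: pvRunB (some (pvEmit prev t)) ts

theorem foldl_pvStepB (ts : List String) : ∀ (l : List String) (p : Option String),
    (ts.foldl pvStepB (l, p)).1 = l ++ pvRunB p ts := by
  induction ts with
  | nil => simp [pvRunB]
  | cons t ts ih =>
    intro l p
    simp only [List.foldl_cons, pvStepB, pvRunB, pvEmit, ih, List.append_assoc,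
      List.singleton_append]

theorem pvEmit_nonflag (prev : Option String) (t : String)
    (h1 : prev ≠ some "--api-key") (h2 : prev ≠ some "--resume") :
    pvEmit prev t = t := by
  cases prev with
  | none => rfl
  | some p =>
    have h1' : p ≠ "--api-key" := fun h => h1 (by rw [h])
    have h2' : p ≠ "--resume" := fun h => h2 (by rw [h])
    show PySem.Dict.getD pvPlaceholder p t = t
    rw [show pvPlaceholder = PySem.Dict.mk [("--api-key", "***REDACTED***"), ("--resume", "***SESSION***")] from rfl,
      PySem.Dict.getD_eq_get?_getD, PySem.Dict.get?_mk_cons, PySem.Dict.get?_mk_cons]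
    simp [Ne.symm h1', Ne.symm h2', PySem.Dict.get?]

-- When the previous emitted token is not a flag, B's scan computes exactly A's result.
theorem pvRunB_eq_pvRedactA : ∀ (xs : List String) (prev : Option String),
    prev ≠ some "--api-key" → prev ≠ some "--resume" →
    pvRunB prev xs = pvRedactA xs := by
  intro xs
  fun_induction pvRedactA xs with
  | case1 => intro prev _ _; simp [pvRunB]
  | case2 x rest h ih =>
    intro prev h1 h2
    obtain ⟨hx, hne⟩ := h; subst hx
    obtain ⟨r, rs, rfl⟩ := List.exists_cons_of_ne_nil hne
    simp only [pvRunB, List.tail_cons, pvEmit_nonflag prev _ h1 h2]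
    have he : pvEmit (some "--api-key") r = "***REDACTED***" := by
      show PySem.Dict.getD pvPlaceholder "--api-key" r = _
      rw [PySem.Dict.getD_eq_get?_getD,
        show PySem.Dict.get? pvPlaceholder "--api-key" = some "***REDACTED***" from rfl]
      rfl
    simp only [List.tail_cons] at ih
    rw [he, ih (some "***REDACTED***") (by decide) (by decide)]
  | case3 x rest hnot h ih =>
    intro prev h1 h2
    obtain ⟨hx, hne⟩ := h; subst hx
    obtain ⟨r, rs, rfl⟩ := List.exists_cons_of_ne_nil hne
    simp only [pvRunB, List.tail_cons, pvEmit_nonflag prev _ h1 h2]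
    have he : pvEmit (some "--resume") r = "***SESSION***" := by
      show PySem.Dict.getD pvPlaceholder "--resume" r = _
      rw [PySem.Dict.getD_eq_get?_getD,
        show PySem.Dict.get? pvPlaceholder "--resume" = some "***SESSION***" from rfl]
      rfl
    simp only [List.tail_cons] at ih
    rw [he, ih (some "***SESSION***") (by decide) (by decide)]
  | case4 x rest h1 h2 ih =>
    intro prev hp1 hp2
    simp only [pvRunB, pvEmit_nonflag prev x hp1 hp2]
    by_cases hak : x = "--api-key"
    · have hrest : rest = [] := by by_contra hne; exact h1 ⟨hak, hne⟩
      subst hrest; simp [pvRunB, pvRedactA]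
    · by_cases hrs : x = "--resume"
      · have hrest : rest = [] := by by_contra hne; exact h2 ⟨hrs, hne⟩
        subst hrest; simp [pvRunB, pvRedactA]
      · rw [ih (some x) (by simp [hak]) (by simp [hrs])]

-- ===== VERDICT (by name: the statement is the Claim_ definition above) =====
theorem cursor_agent_command_for_log_py_spec : Claim_equal_cursor_agent_command_for_log_py := by
  intro cmd _
  unfold Spec_cursor_agent_command_for_log_py cursor_agent_command_for_log_py cursor_agent_command_for_log_py_alt
  rw [foldl_pvStepB, List.nil_append, pvRunB_eq_pvRedactA cmd none (by simp) (by simp)]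
  unfold pvCommandString
  congr 1
  exact (List.map_congr_left fun x _ => (pvQuoteB_eq x).symm)
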